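-- pv_equiv track=rewrite | github.com/sdawn29/cloud-training | Assgmt_1_func.py | dev_id_search
-- ===== SOURCE A (Python) =====
-- def dev_id_search(dev_id, dev_list):
--     if dev_id in dev_list:
--         return 'Dev Id found,Dev Id=' + str(dev_id) + 'Index=' + str(dev_list.index(dev_id))
--     elif dev_id > max(dev_list):
--         return 'Not found'
--     else:
--         for i in dev_list:
--             if i > dev_id:
--                 return 'val=' + str(i) + 'ind=' + str(dev_list.index(i))
-- ===== SOURCE B (Python) =====
-- def dev_id_search(dev_id, dev_list):
--     # One linear pass: first index equal to dev_id, running max, first (pos, val) with val > dev_id.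
--     found = None
--     mx = None
--     fg = None
--     pos = 0
--     for v in dev_list:
--         if found is None and v == dev_id:
--             found = pos
--         if mx is None or v > mx:
--             mx = v
--         if fg is None and v > dev_id:
--             fg = (pos, v)
--         pos += 1
--     if found is not None:
--         return 'Dev Id found,Dev Id=' + str(dev_id) + 'Index=' + str(found)
--     if mx is None or dev_id > mx:
--         return 'Not found'
--     return 'val=' + str(fg[1]) + 'ind=' + str(fg[0])
-- ===== Notes on version B (the rewrite author's own statement) =====
-- stated objective: alternative
-- what changed: A makes three separate scans (membership test + .index, max(), then a first-greater loop with another .index inside); B makes one linear pass recording the first index equal to dev_id, the running maximum, and the first (index, value) strictly greater than dev_id, then applies A's output priority.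
import Mathlib
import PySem

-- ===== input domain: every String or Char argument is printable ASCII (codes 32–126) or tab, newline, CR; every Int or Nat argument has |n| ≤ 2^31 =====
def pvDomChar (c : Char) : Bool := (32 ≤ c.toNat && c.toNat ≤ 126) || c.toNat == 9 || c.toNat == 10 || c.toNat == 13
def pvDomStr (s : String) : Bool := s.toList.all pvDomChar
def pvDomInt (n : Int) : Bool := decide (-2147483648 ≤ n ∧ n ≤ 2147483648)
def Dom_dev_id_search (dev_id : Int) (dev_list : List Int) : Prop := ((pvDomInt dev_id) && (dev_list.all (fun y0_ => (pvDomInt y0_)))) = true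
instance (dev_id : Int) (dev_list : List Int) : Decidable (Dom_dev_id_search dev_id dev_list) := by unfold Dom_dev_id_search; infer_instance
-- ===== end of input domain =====

-- B replaces A's three separate scans (membership+index, max(), first-greater loop with .index)
-- by ONE pass that records first-equal index, running max and first-greater (index, value);
-- same return value wherever A returns, and B returns 'Not found' where A raises on the empty list.

-- ===== PORT A =====
-- the 'for i in dev_list: if i > dev_id: return ...' loop; 'orig' is the whole list for .index(i)
def dev_id_search_aloop (dev_id : Int) (orig : List Int) : List Int → Option String
  | [] => none                                             -- loop falls through: Python returns None
  | i :: rest =>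
    if i > dev_id then
      match PySem.List.index? orig i with                  -- dev_list.index(i); ValueError → none (unreachable: i ∈ orig)
      | some k => some ("val=" ++ PySem.Int.toStr i ++ "ind=" ++ PySem.Int.toStr (k : Int))
      | none => none
    else dev_id_search_aloop dev_id orig rest

def dev_id_search (dev_id : Int) (dev_list : List Int) : Option String :=
  if dev_id ∈ dev_list then
    match PySem.List.index? dev_list dev_id with           -- always some here
    | some k => some ("Dev Id found,Dev Id=" ++ PySem.Int.toStr dev_id ++ "Index=" ++ PySem.Int.toStr (k : Int))
    | none => none
  else
    match PySem.List.max? dev_list (fun y => y) with       -- max(dev_list); ValueError on [] → none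
    | none => none
    | some m =>
      if dev_id > m then some "Not found"
      else dev_id_search_aloop dev_id dev_list dev_list

-- ===== PORT B =====
-- the single for-loop of Source B, carrying (found, mx, fg) and the position counter
def dev_id_search_bloop (dev_id : Int) (found : Option Int) (mx : Option Int)
    (fg : Option (Int × Int)) (pos : Int) :
    List Int → Option Int × Option Int × Option (Int × Int)
  | [] => (found, mx, fg)
  | v :: rest =>
    dev_id_search_bloop dev_id
      (if found = none ∧ v = dev_id then some pos else found)
      (match mx with | none => some v | some m => if v > m then some v else some m)
      (if fg = none ∧ v > dev_id then some (pos, v) else fg)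
      (pos + 1) rest

def dev_id_search_alt (dev_id : Int) (dev_list : List Int) : Option String :=
  match dev_id_search_bloop dev_id none none none 0 dev_list with
  | (some k, _, _) =>
      some ("Dev Id found,Dev Id=" ++ PySem.Int.toStr dev_id ++ "Index=" ++ PySem.Int.toStr k)
  | (none, none, _) => some "Not found"                    -- 'mx is None or dev_id > mx'
  | (none, some m, fg) =>
      if dev_id > m then some "Not found"
      else
        match fg with
        | some pv => some ("val=" ++ PySem.Int.toStr pv.2 ++ "ind=" ++ PySem.Int.toStr pv.1)
        | none => none                                     -- fg[1] on None: TypeError (unreachable here)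

-- ===== PRECONDITION & SPEC =====
-- Pre_ excludes only the empty list, on which A raises ValueError from max([]) (membership can never succeed there); B returns 'Not found' on it.
def Pre_dev_id_search (dev_id : Int) (dev_list : List Int) : Prop := dev_list ≠ []
instance (dev_id : Int) (dev_list : List Int) : Decidable (Pre_dev_id_search dev_id dev_list) := by unfold Pre_dev_id_search; infer_instance
def pvWitness_dev_id_search : Int × List Int := (5, [3, 7, 5])

def Spec_dev_id_search (dev_id : Int) (dev_list : List Int) (out : Option String) : Prop := out = dev_id_search_alt dev_id dev_list
instance (dev_id : Int) (dev_list : List Int) (out : Option String) : Decidable (Spec_dev_id_search dev_id dev_list out) := by unfold Spec_dev_id_search; infer_instance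

-- ===== CLAIM (what is proved, stated in full; the proofs are below) =====
def Claim_equal_dev_id_search : Prop := ∀ (dev_id : Int) (dev_list : List Int), Dom_dev_id_search dev_id dev_list → Pre_dev_id_search dev_id dev_list → Spec_dev_id_search dev_id dev_list (dev_id_search dev_id dev_list)

-- ===== LEMMAS AND PROOFS =====

-- the first (position, value) with value > d, positions counted from p
def fgSpec (d p : Int) : List Int → Option (Int × Int)
  | [] => none
  | v :: rest => if v > d then some (p, v) else fgSpec d (p + 1) rest

theorem bloop_found (d : Int) (l : List Int) : ∀ (f mx : Option Int) (g : Option (Int × Int)) (p : Int),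
    (dev_id_search_bloop d f mx g p l).1 =
      (match f with
       | some j => some j
       | none => (PySem.List.index? l d).map (fun k => p + (k : Int))) := by
  induction l with
  | nil =>
    intro f mx g p
    cases f <;> simp [dev_id_search_bloop, PySem.List.index?]
  | cons v rest ih =>
    intro f mx g p
    cases f with
    | some j => simp [dev_id_search_bloop, ih]
    | none =>
      by_cases hv : v = d
      · subst hv
        simp only [dev_id_search_bloop]
        rw [ih, PySem.List.index?_cons_self]
        simp
      · simp only [dev_id_search_bloop, hv, and_false, if_false]
        rw [ih]
        rw [PySem.List.index?_cons_of_ne rest hv]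
        cases h : PySem.List.index? rest d <;> simp
        omega

theorem bloop_mx (d : Int) (l : List Int) : ∀ (f mx : Option Int) (g : Option (Int × Int)) (p : Int),
    (dev_id_search_bloop d f mx g p l).2.1 =
      (match mx with
       | none => PySem.List.max? l (fun y => y)
       | some m0 => some (l.foldl max m0)) := by
  induction l with
  | nil =>
    intro f mx g p
    cases mx <;> simp [dev_id_search_bloop, PySem.List.max?]
  | cons v rest ih =>
    intro f mx g p
    cases mx with
    | none =>
      simp only [dev_id_search_bloop, ih, PySem.List.max?_id_cons]
    | some m0 =>
      have hupd : (if v > m0 then some v else some m0) = some (max m0 v) := by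
        rcases le_or_gt v m0 with h | h
        · rw [if_neg (by omega), max_eq_left h]
        · rw [if_pos h, max_eq_right h.le]
      simp only [dev_id_search_bloop, hupd, ih, List.foldl_cons]

theorem bloop_fg (d : Int) (l : List Int) : ∀ (f mx : Option Int) (g : Option (Int × Int)) (p : Int),
    (dev_id_search_bloop d f mx g p l).2.2 =
      (match g with
       | some q => some q
       | none => fgSpec d p l) := by
  induction l with
  | nil =>
    intro f mx g p
    cases g <;> simp [dev_id_search_bloop, fgSpec]
  | cons v rest ih =>
    intro f mx g p
    cases g with
    | some q => simp [dev_id_search_bloop, ih]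
    | none =>
      by_cases hv : v > d
      · simp [dev_id_search_bloop, hv, ih, fgSpec]
      · simp [dev_id_search_bloop, hv, ih, fgSpec]

-- A's final loop agrees with the first-greater scan: positions from pre.length, no element of pre exceeds d
theorem aloop_eq_fgSpec (d : Int) : ∀ (suf pre : List Int), (∀ y ∈ pre, ¬ d < y) →
    dev_id_search_aloop d (pre ++ suf) suf =
      (match fgSpec d (pre.length : Int) suf with
       | none => none
       | some pv => some ("val=" ++ PySem.Int.toStr pv.2 ++ "ind=" ++ PySem.Int.toStr pv.1)) := by
  intro suf
  induction suf with
  | nil => intro pre h; simp [dev_id_search_aloop, fgSpec]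
  | cons v rest ih =>
    intro pre h
    by_cases hv : d < v
    · have hvpre : v ∉ pre := fun hm => h v hm hv
      have hidx : PySem.List.index? (pre ++ v :: rest) v = some pre.length := by
        rw [PySem.List.index?_eq_some_iff]
        exact ⟨pre, rest, rfl, rfl, hvpre⟩
      simp only [dev_id_search_aloop, if_pos hv, hidx, fgSpec]
    · have hstep : pre ++ v :: rest = (pre ++ [v]) ++ rest := by simp
      have h' : ∀ y ∈ pre ++ [v], ¬ d < y := by
        intro y hy
        rcases List.mem_append.1 hy with hy | hy
        · exact h y hy
        · simp at hy; subst hy; exact hv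
      have hih := ih (pre ++ [v]) h'
      simp only [dev_id_search_aloop, if_neg hv]
      rw [hstep, hih]
      have hlen : (((pre ++ [v]).length : Int)) = (pre.length : Int) + 1 := by simp
      rw [hlen]
      simp [fgSpec, hv]

theorem dev_id_search_spec : Claim_equal_dev_id_search := by
  intro dev_id dev_list _ hpre
  unfold Spec_dev_id_search
  unfold dev_id_search dev_id_search_alt
  have hfound := bloop_found dev_id dev_list none none none 0
  have hmx := bloop_mx dev_id dev_list none none none 0
  have hfg := bloop_fg dev_id dev_list none none none 0
  by_cases hmem : dev_id ∈ dev_list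
  · -- found branch
    rw [if_pos hmem]
    have hsome : (PySem.List.index? dev_list dev_id).isSome :=
      (PySem.List.index?_isSome_iff dev_list dev_id).2 hmem
    rcases Option.isSome_iff_exists.1 hsome with ⟨k, hk⟩
    have hf1 : (dev_id_search_bloop dev_id none none none 0 dev_list).1 = some (k : Int) := by
      rw [hfound]; rw [hk]; simp
    rcases hres : dev_id_search_bloop dev_id none none none 0 dev_list with ⟨f, mx, fg⟩
    rw [hres] at hf1
    simp only at hf1
    subst hf1
    rw [hk]
  · -- not-found branches
    rw [if_neg hmem]
    have hf1 : (dev_id_search_bloop dev_id none none none 0 dev_list).1 = none := by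
      rw [hfound, (PySem.List.index?_eq_none_iff dev_list dev_id).2 hmem]; rfl
    rcases hres : dev_id_search_bloop dev_id none none none 0 dev_list with ⟨f, mx, fg⟩
    rw [hres] at hf1 hmx hfg
    simp only at hf1 hmx hfg
    subst hf1
    rcases dev_list with _ | ⟨x, t⟩
    · exact absurd rfl hpre
    · rw [PySem.List.max?_id_cons]
      rw [PySem.List.max?_id_cons] at hmx
      subst hmx
      by_cases hgt : dev_id > t.foldl max x
      · simp [hgt]
      · have halt := aloop_eq_fgSpec dev_id (x :: t) [] (by simp)
        simp only [List.nil_append, List.length_nil, Int.natCast_zero] at halt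
        simp only [if_neg hgt, halt]
        subst hfg
        rcases fgSpec dev_id 0 (x :: t) with _ | ⟨p, v⟩ <;> simp
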